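-- pv_equiv track=rewrite | github.com/svend4/meta | projects/hexglyph/solan_forbidden.py | observed_cell
-- ===== SOURCE A (Python) =====
-- import math
--
-- _DEFAULT_M: int = 3
--
-- _MIN_REPS:  int = 8   # minimum period repetitions for series extension
--
-- def ordinal_pattern(window: list | tuple) -> tuple[int, ...]:
--     """Rank-order permutation of *window* (stable sort, ties by index)."""
--     m = len(window)
--     indexed = sorted(range(m), key=lambda i: (window[i], i))
--     ranks = [0] * m
--     for rank, idx in enumerate(indexed):
--         ranks[idx] = rank
--     return tuple(ranks)
--
-- def observed_cell(series: list[int | float], m: int = _DEFAULT_M,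
--                   min_reps: int = _MIN_REPS) -> frozenset[tuple[int, ...]]:
--     """Set of ordinal patterns observed in *series* (treated as periodic)."""
--     P = len(series)
--     if P == 0:
--         return frozenset()
--     repeat = max(min_reps, math.ceil(24 / max(P, 1)))
--     n = P * repeat
--     obs: set[tuple[int, ...]] = set()
--     for j in range(n - m + 1):
--         win = [series[(j + k) % P] for k in range(m)]
--         obs.add(ordinal_pattern(win))
--     return frozenset(obs)
-- ===== SOURCE B (Python) =====
-- def ordinal_pattern(window):
--     """Rank-order permutation of *window*: one sort of the (value, index)
--     pairs, then a rank table mapping each pair to its sorted position."""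
--     pairs = list(zip(window, range(len(window))))
--     rank = {p: r for r, p in enumerate(sorted(pairs))}
--     return tuple(rank[p] for p in pairs)
--
-- def observed_cell(series, m=3, min_reps=8):
--     """Set of ordinal patterns observed in *series* (treated as periodic).
--
--     A window starting at j sees the same values as the window starting at
--     j mod P, so only the first min(P, #windows) starts need to be scanned;
--     wrapped windows are plain slices of a replicated copy of the series.
--     """
--     P = len(series)
--     if P == 0:
--         return frozenset()
--     total = P * max(min_reps, -(-24 // P)) - m + 1   # number of windows A scans
--     if total <= 0:
--         return frozenset()
--     w = max(m, 0)
--     ext = series * (w // P + 2)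
--     return frozenset(ordinal_pattern(ext[j:j + w]) for j in range(min(P, total)))
-- ===== Notes on version B (the rewrite author's own statement) =====
-- stated objective: faster
-- what changed: B scans only the min(P, #windows) distinct window starts (a window's ordinal pattern depends only on its start modulo the period P), takes each wrapped window as a plain slice of a replicated copy of the series instead of per-element modular indexing, and computes each pattern by sorting the (value, index) pairs once and reading ranks from a position table instead of argsort-and-scatter over indices.
import Mathlib
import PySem

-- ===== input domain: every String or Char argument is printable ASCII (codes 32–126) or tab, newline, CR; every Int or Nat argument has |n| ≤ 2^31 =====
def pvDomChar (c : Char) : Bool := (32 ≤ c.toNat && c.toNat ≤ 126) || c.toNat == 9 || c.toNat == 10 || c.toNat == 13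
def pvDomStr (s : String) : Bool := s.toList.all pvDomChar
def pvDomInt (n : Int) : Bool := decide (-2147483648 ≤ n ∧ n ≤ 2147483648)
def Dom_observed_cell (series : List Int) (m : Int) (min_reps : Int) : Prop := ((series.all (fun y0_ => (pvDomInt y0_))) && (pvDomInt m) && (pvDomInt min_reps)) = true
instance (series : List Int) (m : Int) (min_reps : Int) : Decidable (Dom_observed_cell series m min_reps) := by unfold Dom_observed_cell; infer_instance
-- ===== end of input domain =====

-- B scans only the min(P, #windows) distinct window starts (a window's pattern depends
-- only on its start modulo the period P) and takes wrapped windows as slices of a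
-- replicated copy of the series; objective: faster (removes the repeat factor).

-- ===== PORT A =====
-- A-side helper: ordinal_pattern (stable rank-order permutation).
-- window[i] is always indexed in range here, so it is ported as pyGetD … 0 (default never used).
def ordinal_pattern (window : List Int) : List Int :=
  let m : Int := window.length
  let indexed := PySem.List.sorted2 (PySem.List.pyRange 0 m)
      (fun i => PySem.List.pyGetD window i 0) (fun i => i)
  (PySem.List.enumerate indexed).foldl
    (fun ranks ri => PySem.List.pySetD ranks ri.2 ri.1)
    (List.replicate m.toNat 0)

-- math.ceil(24 / max(P, 1)) is ported as ceiling division -((-24) // max(P,1)): exact here,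
-- since for 1 ≤ x ≤ 2^31 the float 24/x never rounds across an integer.
-- series[(j+k) % P] is always indexed in range (0 ≤ (j+k) % P < P), so pyGetD's default is never used.
def observed_cell (series : List Int) (m : Int) (min_reps : Int) : List (List Int) :=
  let P : Int := series.length
  if P = 0 then PySem.Set.empty
  else
    let rep : Int := max min_reps (-(PySem.Int.floordiv (-24) (max P 1)))
    let n : Int := P * rep
    (PySem.List.pyRange 0 (n - m + 1)).foldl
      (fun obs j =>
        PySem.Set.add obs (ordinal_pattern
          ((PySem.List.pyRange 0 m).map
            (fun k => PySem.List.pyGetD series (PySem.Int.mod (j + k) P) 0))))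
      PySem.Set.empty

-- ===== PORT B =====
-- B-side helper: one sort of the (value, index) pairs, then a rank table.
-- Python compares tuples lexicographically, so sorted(pairs) is ported with the toLex key;
-- rank[p] always finds its key (every pair was inserted), so it is ported as getD … 0 (default never used).
def ordinal_pattern_alt (window : List Int) : List Int :=
  let pairs := List.zip window (PySem.List.pyRange 0 (window.length : Int))
  let order := PySem.List.sorted pairs (fun p => toLex p)
  let rank := (PySem.List.enumerate order).foldl
      (fun d rp => PySem.Dict.insert d rp.2 rp.1) PySem.Dict.empty
  pairs.map (fun p => ((PySem.Dict.getD rank p 0 : Int)))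

def observed_cell_alt (series : List Int) (m : Int) (min_reps : Int) : List (List Int) :=
  let P : Int := series.length
  if P = 0 then []
  else
    let total : Int := P * max min_reps (-(PySem.Int.floordiv (-24) P)) - m + 1
    if total ≤ 0 then []
    else
      let w : Int := max m 0
      let ext := PySem.List.pyRepeat series (PySem.Int.floordiv w P + 2)
      PySem.Set.ofList ((PySem.List.pyRange 0 (min P total)).map
        (fun j => ordinal_pattern_alt (PySem.List.slice ext (some j) (some (j + w)))))

-- ===== PRECONDITION & SPEC =====
def Spec_observed_cell (series : List Int) (m : Int) (min_reps : Int) (out : List (List Int)) : Prop := out = observed_cell_alt series m min_reps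
instance (series : List Int) (m : Int) (min_reps : Int) (out : List (List Int)) : Decidable (Spec_observed_cell series m min_reps out) := by unfold Spec_observed_cell; infer_instance

-- ===== CLAIM (what is proved, stated in full; the proofs are below) =====
def Claim_equal_observed_cell : Prop := ∀ (series : List Int) (m : Int) (min_reps : Int), Dom_observed_cell series m min_reps → Spec_observed_cell series m min_reps (observed_cell series m min_reps)

-- ===== LEMMAS AND PROOFS =====

theorem pyRange_nil_of_le {a b : Int} (h : b ≤ a) : PySem.List.pyRange a b = [] := by
  simp [PySem.List.pyRange, if_neg (not_lt.mpr h)]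

theorem sorted2_lex (xs : List Int) (k1 : Int → Int) :
    PySem.List.sorted2 xs k1 (fun i => i) =
      PySem.List.sorted xs (fun i => toLex (k1 i, i)) := by
  rw [PySem.List.sorted_eq_foldl_insertBy]
  show List.foldl (fun acc x => PySem.List.insertBy _ x acc) [] xs = _
  have hb : (fun a b : Int => decide (k1 a < k1 b) || (!decide (k1 b < k1 a) && decide (a < b)))
      = (fun a b : Int => decide (toLex (k1 a, a) < toLex (k1 b, b))) := by
    funext a b
    simp only [Prod.Lex.toLex_lt_toLex]
    by_cases h1 : k1 a < k1 b <;> by_cases h2 : k1 b < k1 a <;> by_cases h3 : a < b <;>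
      simp [h1, h2, h3] <;> omega
  simp only [if_neg (by decide : ¬(false = true))]
  rw [hb]

theorem idxOf_eq_countP {α κ : Type} [BEq α] [LawfulBEq α] [LinearOrder κ] (key : α → κ) :
    ∀ (l : List α), l.Pairwise (fun a b => key a < key b) → ∀ i ∈ l,
      l.idxOf i = l.countP (fun j => decide (key j < key i)) := by
  intro l
  induction l with
  | nil => intro _ i hi; simp at hi
  | cons a t ih =>
    intro hp i hi
    rcases List.pairwise_cons.mp hp with ⟨ha, ht⟩
    rcases List.mem_cons.mp hi with rfl | hit
    · rw [List.idxOf_cons_self]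
      rw [List.countP_cons, if_neg (by simp)]
      have : t.countP (fun j => decide (key j < key i)) = 0 := by
        rw [List.countP_eq_zero]
        intro j hj
        simp only [decide_eq_true_eq]
        exact not_lt.mpr (le_of_lt (ha j hj))
      simp [this]
    · have hlt : key a < key i := ha i hit
      have hne : a ≠ i := fun h => absurd hlt (by simp [h])
      rw [List.idxOf_cons_ne _ hne, List.countP_cons,
        if_pos (by simpa using hlt), ih ht i hit]

theorem ranks_fold_length (p : List Int) : ∀ (r0 : Int) (acc : List Int),
    ((PySem.List.enumerate p r0).foldl
      (fun ranks ri => PySem.List.pySetD ranks ri.2 ri.1) acc).length = acc.length := by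
  induction p with
  | nil => intro r0 acc; rfl
  | cons x t ih =>
    intro r0 acc
    show ((PySem.List.enumerate t (r0+1)).foldl _ (PySem.List.pySetD acc x r0)).length = _
    rw [ih (r0+1) _, PySem.List.length_pySetD]

theorem ranks_fold_getD (p : List Int) : ∀ (r0 : Int) (acc : List Int),
    p.Nodup → (∀ x ∈ p, 0 ≤ x ∧ x.toNat < acc.length) → ∀ (t : Nat), t < acc.length →
    ((PySem.List.enumerate p r0).foldl
      (fun ranks ri => PySem.List.pySetD ranks ri.2 ri.1) acc).getD t 0 =
      if (t : Int) ∈ p then r0 + p.idxOf (t : Int) else acc.getD t 0 := by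
  induction p with
  | nil => intro r0 acc _ _ t ht; simp
  | cons x p ih =>
    intro r0 acc hnd hb t ht
    rcases List.nodup_cons.mp hnd with ⟨hxp, hndp⟩
    obtain ⟨hx0, hxlt⟩ := hb x (by simp)
    have hset : PySem.List.pySetD acc x r0 = acc.set x.toNat r0 :=
      PySem.List.pySetD_of_nonneg acc r0 hx0
    show ((PySem.List.enumerate p (r0+1)).foldl _ (PySem.List.pySetD acc x r0)).getD t 0 = _
    rw [hset]
    have hlen : (acc.set x.toNat r0).length = acc.length := by simp
    rw [ih (r0+1) _ hndp (fun y hy => by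
        obtain ⟨h1, h2⟩ := hb y (by simp [hy]); exact ⟨h1, by omega⟩) t (by omega)]
    by_cases hm : (t : Int) ∈ p
    · have hne : (t : Int) ≠ x := fun h => hxp (h ▸ hm)
      rw [if_pos hm, if_pos (by simp [hm])]
      rw [List.idxOf_cons_ne _ (by exact_mod_cast (Ne.symm hne))]
      push_cast; ring
    · rw [if_neg hm]
      by_cases hx : x.toNat = t
      · have hxt : (t : Int) = x := by omega
        rw [if_pos (by simp [hxt])]
        rw [hxt, List.idxOf_cons_self]
        subst hx
        rw [List.getD_eq_getElem _ _ (by omega), List.getElem_set_self (by omega)]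
        simp
      · have : (t : Int) ∉ (x :: p) := by
          intro h
          rcases List.mem_cons.mp h with h1 | h1
          · exact hx (by omega)
          · exact hm h1
        rw [if_neg this]
        rw [List.getD_eq_getElem _ _ (by omega), List.getD_eq_getElem _ _ ht,
          List.getElem_set_ne (by omega)]

theorem dict_fold_get_notmem (rest : List (Int × Int)) : ∀ (r : Int)
    (d : PySem.Dict (Int × Int) Int) (p : Int × Int), p ∉ rest →
    ((PySem.List.enumerate rest r).foldl
      (fun d rp => PySem.Dict.insert d rp.2 rp.1) d).get? p = d.get? p := by
  induction rest with
  | nil => intro r d p _; rfl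
  | cons q t ih =>
    intro r d p hp
    show ((PySem.List.enumerate t (r + 1)).foldl _ (d.insert q r)).get? p = _
    rw [ih (r + 1) _ p (fun h => hp (List.mem_cons_of_mem _ h)),
      PySem.Dict.get?_insert_of_ne _ _ (fun h => hp (by simp [h]))]

-- the rank-table loop, characterised entrywise

theorem dict_fold_getD (order : List (Int × Int)) : ∀ (r0 : Int)
    (d : PySem.Dict (Int × Int) Int), order.Nodup → ∀ p ∈ order,
    ((PySem.List.enumerate order r0).foldl
      (fun d rp => PySem.Dict.insert d rp.2 rp.1) d).getD p 0 = r0 + order.idxOf p := by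
  induction order with
  | nil => intro r0 d _ p hp; simp at hp
  | cons q t ih =>
    intro r0 d hnd p hp
    rcases List.nodup_cons.mp hnd with ⟨hqt, hndt⟩
    show ((PySem.List.enumerate t (r0 + 1)).foldl _ (d.insert q r0)).getD p 0 = _
    rcases List.mem_cons.mp hp with rfl | hpt
    · rw [PySem.Dict.getD_eq_get?_getD, dict_fold_get_notmem t (r0 + 1) _ p hqt,
        PySem.Dict.get?_insert_self, List.idxOf_cons_self]
      simp
    · have hne : p ≠ q := fun h => hqt (h ▸ hpt)
      rw [ih (r0 + 1) _ hndt p hpt, List.idxOf_cons_ne _ (Ne.symm hne)]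
      push_cast
      ring

theorem pat_eq (w : List Int) : ordinal_pattern w = ordinal_pattern_alt w := by
  classical
  set L := w.length with hLdef
  set key : Int → Lex (Int × Int) := fun i => toLex (PySem.List.pyGetD w i 0, i) with hkey
  have hrange : PySem.List.pyRange 0 (L : Int) = (List.range L).map (fun k : Nat => (k : Int)) :=
    PySem.List.pyRange_zero_natCast L
  have hrangeNodup : (PySem.List.pyRange 0 (L : Int)).Nodup := by
    rw [hrange]
    exact List.nodup_range.map (fun a b => by omega)
  set indexed := PySem.List.sorted (PySem.List.pyRange 0 (L : Int)) key with hindexed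
  have hperm : indexed.Perm (PySem.List.pyRange 0 (L : Int)) :=
    PySem.List.sorted_perm _ _ _
  have hnd : indexed.Nodup := (hperm.nodup_iff).mpr hrangeNodup
  have hkeyInj : ∀ a b : Int, key a = key b → a = b := by
    intro a b h
    have := congrArg ofLex h
    simp [hkey] at this
    exact this.2
  have hpw : indexed.Pairwise (fun a b => key a < key b) := by
    have h1 : indexed.Pairwise (fun a b => key a ≤ key b) :=
      PySem.List.sorted_pairwise _ _
    exact (h1.and hnd).imp (fun {a b} h =>
      lt_of_le_of_ne h.1 (fun he => h.2 (hkeyInj a b he)))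
  have hmemIdx : ∀ t : Nat, t < L → ((t : Int) ∈ indexed) := by
    intro t ht
    rw [hperm.mem_iff, PySem.List.mem_pyRange_one]
    omega
  have hA : ordinal_pattern w =
      (PySem.List.enumerate indexed).foldl
        (fun ranks ri => PySem.List.pySetD ranks ri.2 ri.1)
        (List.replicate L 0) := by
    show (PySem.List.enumerate (PySem.List.sorted2 (PySem.List.pyRange 0 (L : Int))
        (fun i => PySem.List.pyGetD w i 0) (fun i => i))).foldl _
        (List.replicate (L : Int).toNat 0) = _
    rw [sorted2_lex, Int.toNat_natCast]
  have hAlen : (ordinal_pattern w).length = L := by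
    rw [hA, ranks_fold_length, List.length_replicate]
  have hbound : ∀ x ∈ indexed, 0 ≤ x ∧ x.toNat < (List.replicate L (0 : Int)).length := by
    intro x hx
    rw [hperm.mem_iff, PySem.List.mem_pyRange_one] at hx
    refine ⟨hx.1, ?_⟩
    rw [List.length_replicate]
    omega
  have hAt : ∀ t : Nat, t < L → ∀ (h1 : t < (ordinal_pattern w).length),
      (ordinal_pattern w)[t] =
      ((List.countP (fun k : Nat => decide (key (k : Int) < key (t : Int)))
        (List.range L) : Nat) : Int) := by
    intro t ht h1
    rw [← List.getD_eq_getElem _ 0 h1, hA,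
      ranks_fold_getD indexed 0 _ hnd hbound t (by rw [List.length_replicate]; omega),
      if_pos (hmemIdx t ht),
      idxOf_eq_countP key indexed hpw _ (hmemIdx t ht),
      hperm.countP_eq, hrange, List.countP_map]
    simp only [Function.comp_def, zero_add]
  -- B side
  have hwself : w = (List.range L).map (fun k => w.getD k 0) := by
    refine List.ext_getElem (by simp [hLdef]) ?_
    intro t h1 h2
    simp [h1]
  have hpairs : List.zip w (PySem.List.pyRange 0 (L : Int)) =
      (List.range L).map (fun k : Nat => (w.getD k 0, (k : Int))) := by
    conv_lhs => rw [hwself, hrange]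
    exact List.zip_map'
  have hpairsNodup : (List.zip w (PySem.List.pyRange 0 (L : Int))).Nodup := by
    rw [hpairs]
    refine List.nodup_range.map ?_
    intro a b hab
    have := congrArg Prod.snd hab
    simpa using this
  set order := PySem.List.sorted (List.zip w (PySem.List.pyRange 0 (L : Int)))
      (fun p => toLex p) with horder
  have hoperm : order.Perm (List.zip w (PySem.List.pyRange 0 (L : Int))) :=
    PySem.List.sorted_perm _ _ _
  have hond : order.Nodup := (hoperm.nodup_iff).mpr hpairsNodup
  have hopw : order.Pairwise (fun a b => toLex a < toLex b) := by
    have h1 : order.Pairwise (fun a b => toLex a ≤ toLex b) :=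
      PySem.List.sorted_pairwise _ _
    exact (h1.and hond).imp (fun {a b} h =>
      lt_of_le_of_ne h.1 (fun he => h.2 (by
        have := congrArg ofLex he
        simpa using this)))
  have hlook : ∀ p ∈ List.zip w (PySem.List.pyRange 0 (L : Int)),
      ((PySem.List.enumerate order).foldl
        (fun d rp => PySem.Dict.insert d rp.2 rp.1) PySem.Dict.empty).getD p 0 =
      ((List.countP (fun q : Int × Int => decide (toLex q < toLex p))
        (List.zip w (PySem.List.pyRange 0 (L : Int))) : Nat) : Int) := by
    intro p hp
    have hmem : p ∈ order := by rw [hoperm.mem_iff]; exact hp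
    rw [dict_fold_getD order 0 _ hond _ hmem,
      idxOf_eq_countP (fun p => toLex p) order hopw _ hmem, hoperm.countP_eq]
    simp
  have hB : ordinal_pattern_alt w =
      (List.range L).map (fun t : Nat =>
        ((List.countP (fun q : Int × Int => decide (toLex q < toLex (w.getD t 0, (t : Int))))
          (List.zip w (PySem.List.pyRange 0 (L : Int))) : Nat) : Int)) := by
    show (List.zip w (PySem.List.pyRange 0 (L : Int))).map _ = _
    rw [List.map_congr_left hlook, hpairs, List.map_map]
    rfl
  refine List.ext_getElem (by rw [hAlen, hB]; simp) ?_
  intro t h1 h2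
  have ht : t < L := by omega
  rw [hAt t ht h1, List.getElem_of_eq hB h2, List.getElem_map, List.getElem_range]
  congr 1
  rw [hpairs, List.countP_map]
  refine List.countP_congr (fun k hk => ?_)
  simp only [Function.comp_def, hkey, PySem.List.pyGetD_natCast]

theorem foldl_add_absorb (ys : List (List Int)) : ∀ (s : PySem.Set (List Int)),
    (∀ y ∈ ys, y ∈ s) → ys.foldl PySem.Set.add s = s := by
  induction ys with
  | nil => intro s _; rfl
  | cons y t ih =>
    intro s h
    have hy : y ∈ s := h y (by simp)
    have hadd : PySem.Set.add s y = s := by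
      simp [PySem.Set.add, PySem.Set.contains, hy]
    rw [List.foldl_cons, hadd]
    exact ih s (fun z hz => h z (by simp [hz]))

theorem ofList_append_absorb (xs ys : List (List Int)) (h : ∀ y ∈ ys, y ∈ xs) :
    PySem.Set.ofList (xs ++ ys) = PySem.Set.ofList xs := by
  rw [PySem.Set.ofList_eq_foldl, List.foldl_append, ← PySem.Set.ofList_eq_foldl]
  exact foldl_add_absorb ys _ (fun y hy => (PySem.Set.mem_ofList xs y).mpr (h y hy))

theorem length_flatten_replicate (s : List Int) (c : Nat) :
    (List.replicate c s).flatten.length = c * s.length := by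
  induction c with
  | zero => simp
  | succ n ih => rw [List.replicate_succ, List.flatten_cons, List.length_append, ih]; ring

theorem getD_flatten_replicate (s : List Int) :
    ∀ (c t : Nat), t < c * s.length →
      (List.replicate c s).flatten.getD t 0 = s.getD (t % s.length) 0 := by
  intro c
  induction c with
  | zero => intro t ht; omega
  | succ n ih =>
    intro t ht
    rw [List.replicate_succ, List.flatten_cons]
    by_cases h : t < s.length
    · rw [List.getD, List.getElem?_append_left h, Nat.mod_eq_of_lt h]; rfl
    · have h2 : t - s.length < n * s.length := by
        have : (n + 1) * s.length = n * s.length + s.length := by ring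
        omega
      rw [List.getD, List.getElem?_append_right (by omega)]
      rw [Nat.mod_eq_sub_mod (by omega)]
      exact ih (t - s.length) h2

theorem winA_mod (s : List Int) (m : Int) (hL : 0 < s.length) (j : Int) :
    (PySem.List.pyRange 0 m).map
        (fun k => PySem.List.pyGetD s (PySem.Int.mod (j + k) (s.length : Int)) 0) =
      (PySem.List.pyRange 0 m).map
        (fun k => PySem.List.pyGetD s
          (PySem.Int.mod (PySem.Int.mod j (s.length : Int) + k) (s.length : Int)) 0) := by
  refine List.map_congr_left (fun k _ => ?_)
  congr 1
  have hP : (0 : Int) < (s.length : Int) := by exact_mod_cast hL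
  rw [PySem.Int.mod_eq_emod_of_pos hP, PySem.Int.mod_eq_emod_of_pos hP,
    PySem.Int.mod_eq_emod_of_pos hP]
  conv_lhs => rw [Int.add_emod]
  conv_rhs => rw [Int.add_emod, Int.emod_emod_of_dvd _ dvd_rfl]

theorem winB_eq_winA (s : List Int) (m : Int) (j : Nat) (hj : j < s.length) :
    PySem.List.slice (PySem.List.pyRepeat s (PySem.Int.floordiv (max m 0) s.length + 2))
        (some (j : Int)) (some ((j : Int) + max m 0)) =
      (PySem.List.pyRange 0 m).map
        (fun k => PySem.List.pyGetD s (PySem.Int.mod ((j : Int) + k) s.length) 0) := by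
  have hL : 0 < s.length := by omega
  by_cases hm : m ≤ 0
  · have h1 : max m 0 = 0 := by omega
    rw [h1, pyRange_nil_of_le hm]
    have : ((j : Int) + 0) = ((j : Nat) : Int) := by ring
    rw [this, PySem.List.slice_natCast]
    simp
  · rw [not_le] at hm
    set wn := m.toNat with hwn
    have hmw : m = (wn : Int) := by omega
    have hmax : max m 0 = m := by omega
    have hq : PySem.Int.floordiv (max m 0) (s.length : Int) = ((wn / s.length : Nat) : Int) := by
      rw [hmax, hmw]
      exact_mod_cast PySem.Int.floordiv_natCast wn s.length
    set c := wn / s.length + 2 with hc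
    have hext : PySem.List.pyRepeat s (PySem.Int.floordiv (max m 0) (s.length : Int) + 2)
        = (List.replicate c s).flatten := by
      unfold PySem.List.pyRepeat
      rw [hq]
      congr 1
    have hclen : (List.replicate c s).flatten.length = c * s.length :=
      length_flatten_replicate s c
    have hbound : j + wn ≤ c * s.length := by
      have h1 : s.length * (wn / s.length) + wn % s.length = wn := Nat.div_add_mod wn s.length
      have h2 : wn % s.length < s.length := Nat.mod_lt _ hL
      have h3 : c * s.length = s.length * (wn / s.length) + 2 * s.length := by rw [hc]; ring
      omega
    rw [hext, hmax, hmw]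
    have hcast : ((j : Int) + (wn : Int)) = (((j + wn : Nat)) : Int) := by push_cast; ring
    rw [hcast, PySem.List.slice_natCast]
    have htk : j + wn - j = wn := by omega
    rw [htk]
    rw [PySem.List.pyRange_zero_natCast, List.map_map]
    -- elementwise
    refine List.ext_getElem ?_ ?_
    · rw [List.length_take, List.length_drop, hclen, List.length_map, List.length_range]
      omega
    · intro t h1 h2
      rw [List.length_map, List.length_range] at h2
      rw [List.getElem_take, List.getElem_drop]
      rw [List.getElem_map, List.getElem_range]
      simp only [Function.comp_def]
      have hcast2 : ((j : Int) + (t : Int)) = (((j + t : Nat)) : Int) := by push_cast; ring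
      rw [hcast2, PySem.Int.mod_natCast, PySem.List.pyGetD_natCast]
      rw [← List.getD_eq_getElem _ 0, getD_flatten_replicate s c (j + t) (by omega)]

theorem observed_cell_eq (series : List Int) (m : Int) (min_reps : Int) :
    observed_cell series m min_reps = observed_cell_alt series m min_reps := by
  by_cases h0 : series.length = 0
  · simp [observed_cell, observed_cell_alt, h0, PySem.Set.empty]
  · have hL : 0 < series.length := Nat.pos_of_ne_zero h0
    have hP0 : ((series.length : Int)) ≠ 0 := by exact_mod_cast h0
    have hPpos : (0 : Int) < (series.length : Int) := by exact_mod_cast hL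
    have hmax : max ((series.length : Int)) 1 = (series.length : Int) := by omega
    set P : Int := (series.length : Int) with hPdef
    set rep : Int := max min_reps (-(PySem.Int.floordiv (-24) P)) with hrep
    set total : Int := P * rep - m + 1 with htotal
    set g : Int → List Int := fun j => ordinal_pattern
      ((PySem.List.pyRange 0 m).map
        (fun k => PySem.List.pyGetD series (PySem.Int.mod (j + k) P) 0)) with hg
    set gB : Int → List Int := fun j => ordinal_pattern_alt
      (PySem.List.slice (PySem.List.pyRepeat series (PySem.Int.floordiv (max m 0) P + 2))
        (some j) (some (j + max m 0))) with hgB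
    have hA : observed_cell series m min_reps =
        (PySem.List.pyRange 0 total).foldl (fun obs j => PySem.Set.add obs (g j)) [] := by
      unfold observed_cell
      rw [if_neg hP0]
      rw [hmax]
      rfl
    by_cases htot : total ≤ 0
    · have hB : observed_cell_alt series m min_reps = [] := by
        unfold observed_cell_alt
        rw [if_neg hP0, if_pos htot]
      rw [hA, hB, pyRange_nil_of_le htot]
      rfl
    · rw [not_le] at htot
      have hB : observed_cell_alt series m min_reps =
          PySem.Set.ofList ((PySem.List.pyRange 0 (min P total)).map gB) := by
        unfold observed_cell_alt
        rw [if_neg hP0, if_neg (not_le.mpr htot)]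
      have hQ0 : 0 ≤ min P total := by omega
      have hQle : min P total ≤ total := by omega
      have hsplit : PySem.List.pyRange 0 total =
          PySem.List.pyRange 0 (min P total) ++ PySem.List.pyRange (min P total) total :=
        PySem.List.pyRange_one_append 0 (min P total) total hQ0 hQle
      have hAof : observed_cell series m min_reps =
          PySem.Set.ofList ((PySem.List.pyRange 0 total).map g) := by
        rw [hA, PySem.Set.ofList_eq_foldl, List.foldl_map]
      rw [hAof, hB, hsplit, List.map_append]
      rw [ofList_append_absorb _ _ ?tail]
      case tail =>
        intro y hy
        obtain ⟨j, hj, rfl⟩ := List.mem_map.mp hy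
        rw [PySem.List.mem_pyRange_one] at hj
        have hQP : min P total = P := by omega
        have hjm : g j = g (PySem.Int.mod j P) := by
          rw [hg]
          exact congrArg ordinal_pattern (winA_mod series m hL j)
        refine List.mem_map.mpr ⟨PySem.Int.mod j P, ?_, hjm.symm⟩
        rw [PySem.List.mem_pyRange_one, hQP]
        exact ⟨PySem.Int.mod_nonneg j hPpos, PySem.Int.mod_lt j hPpos⟩
      congr 1
      refine List.map_congr_left (fun j hj => ?_)
      rw [PySem.List.mem_pyRange_one] at hj
      have hjn : j = ((j.toNat : Nat) : Int) := by omega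
      have hjlt : j.toNat < series.length := by omega
      show g j = gB j
      rw [hjn]
      simp only [hg, hgB]
      rw [hPdef, winB_eq_winA series m j.toNat hjlt]
      exact pat_eq _

-- ===== VERDICT (by name: the statement is the Claim_ definition above) =====

-- ===== VERDICT (by name: the statement is the Claim_ definition above) =====
theorem observed_cell_spec : Claim_equal_observed_cell := by
  intro series m min_reps _
  unfold Spec_observed_cell
  exact observed_cell_eq series m min_reps
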